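-- pv_equiv track=rewrite | github.com/hjsh200219/pharmport | build_profiles.py | assign_cluster_ids
-- ===== SOURCE A (Python) =====
-- def assign_cluster_ids(profile_hash_map: dict[str, str | None]) -> dict[str, int | None]:
--     """동일 profile_hash를 가진 성분코드에 동일 cluster_id를 부여한다.
--
--     Args:
--         profile_hash_map: {심평원성분코드: profile_hash or None}
--
--     Returns:
--         {심평원성분코드: cluster_id or None}
--     """
--     # profile_hash → cluster_id 매핑 (None 해시는 건너뜀)
--     hash_to_cluster: dict[str, int] = {}
--     next_cluster_id = 1
--
--     for code, ph in sorted(profile_hash_map.items()):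
--         if ph is None:
--             continue
--         if ph not in hash_to_cluster:
--             hash_to_cluster[ph] = next_cluster_id
--             next_cluster_id += 1
--
--     # 코드별 cluster_id 매핑
--     code_to_cluster: dict[str, int | None] = {}
--     for code, ph in profile_hash_map.items():
--         if ph is None:
--             code_to_cluster[code] = None
--         else:
--             code_to_cluster[code] = hash_to_cluster[ph]
--
--     return code_to_cluster
-- ===== SOURCE B (Python) =====
-- def assign_cluster_ids(profile_hash_map):
--     """Rank each distinct hash by the minimum code carrying it; a code's cluster id
--     is the 1-based position of its hash in that ranking (None stays None)."""
--     min_code = {}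
--     for code, ph in profile_hash_map.items():
--         if ph is not None and (ph not in min_code or code < min_code[ph]):
--             min_code[ph] = code
--     ranked = sorted(min_code, key=min_code.get)
--     return {code: None if ph is None else ranked.index(ph) + 1
--             for code, ph in profile_hash_map.items()}
-- ===== Notes on version B (the rewrite author's own statement) =====
-- stated objective: alternative
-- what changed: A sorts all (code, hash) items and numbers hashes by first appearance into an id dict, then rebuilds the output dict by insertion; B never sorts the items or builds an id dict: it indexes each hash to its minimum code in one unsorted pass, sorts only the distinct hashes by that minimum code, and maps each code directly to 1 + the position of its hash in that ranked list.
import Mathlib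
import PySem

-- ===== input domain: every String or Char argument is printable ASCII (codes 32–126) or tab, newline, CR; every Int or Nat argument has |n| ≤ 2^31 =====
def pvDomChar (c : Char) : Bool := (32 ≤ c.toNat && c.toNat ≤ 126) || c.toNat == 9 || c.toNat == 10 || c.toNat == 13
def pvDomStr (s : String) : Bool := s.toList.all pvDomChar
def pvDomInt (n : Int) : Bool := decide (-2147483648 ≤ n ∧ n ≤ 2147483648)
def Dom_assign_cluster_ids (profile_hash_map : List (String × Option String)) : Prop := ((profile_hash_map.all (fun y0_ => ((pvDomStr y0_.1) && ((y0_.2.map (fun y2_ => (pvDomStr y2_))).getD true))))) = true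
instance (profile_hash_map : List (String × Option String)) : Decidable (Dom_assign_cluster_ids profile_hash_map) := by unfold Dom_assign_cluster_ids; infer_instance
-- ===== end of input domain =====

-- B replaces A's "sort all (code, hash) items, number hashes by first appearance into an id dict,
-- rebuild the output dict by insertion" with "index each hash to its minimum code in one unsorted
-- pass, sort only the distinct hashes, and map each code to 1 + its hash's position in that
-- ranked list" (objective: alternative).

-- ===== PORT A =====
-- The dict argument is modelled as its item list; PySem.Dict.ofList is the dict it denotes.
-- sorted(profile_hash_map.items()) compares (code, hash) tuples; dict keys are unique, so only the code decides: key = fst.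
-- hash_to_cluster[ph]: the key is always present (the first loop inserted every non-None hash), ported as getD.
def assign_cluster_ids (profile_hash_map : List (String × Option String)) : List (String × Option Int) :=
  let d := PySem.Dict.ofList profile_hash_map
  let st := (PySem.List.sorted d.items (fun p => p.1) false).foldl
      (fun (acc : PySem.Dict String Int × Int) p =>
        match p.2 with
        | none => acc
        | some ph => if acc.1.contains ph then acc else (acc.1.insert ph acc.2, acc.2 + 1))
      (PySem.Dict.empty, 1)
  (d.items.foldl
      (fun (out : PySem.Dict String (Option Int)) p =>
        match p.2 with
        | none => out.insert p.1 none
        | some ph => out.insert p.1 (some (st.1.getD ph 0)))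
      PySem.Dict.empty).items

-- ===== PORT B =====
-- min_code[ph] where read is always present, ported as getD; ranked.index(ph) never raises
-- (ph is a key of min_code), ported as index? with getD. The final dict comprehension runs over
-- the unique keys of the input dict, so its items are a map over those items.
def assign_cluster_ids_alt (profile_hash_map : List (String × Option String)) : List (String × Option Int) :=
  let items := (PySem.Dict.ofList profile_hash_map).items
  let mc := items.foldl
      (fun (acc : PySem.Dict String String) p =>
        match p.2 with
        | none => acc
        | some ph => if !acc.contains ph || decide (p.1 < acc.getD ph "") then acc.insert ph p.1 else acc)
      PySem.Dict.empty
  let ranked := PySem.List.sorted mc.keys (fun h => mc.getD h "") false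
  items.map (fun p => (p.1, p.2.map (fun ph => ((PySem.List.index? ranked ph).getD 0 : Int) + 1)))

-- ===== PRECONDITION & SPEC =====
def Spec_assign_cluster_ids (profile_hash_map : List (String × Option String)) (out : List (String × Option Int)) : Prop := out = assign_cluster_ids_alt profile_hash_map
instance (profile_hash_map : List (String × Option String)) (out : List (String × Option Int)) : Decidable (Spec_assign_cluster_ids profile_hash_map out) := by unfold Spec_assign_cluster_ids; infer_instance

-- ===== CLAIM (what is proved, stated in full; the proofs are below) =====
def Claim_equal_assign_cluster_ids : Prop := ∀ (profile_hash_map : List (String × Option String)), Dom_assign_cluster_ids profile_hash_map → Spec_assign_cluster_ids profile_hash_map (assign_cluster_ids profile_hash_map)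

-- ===== LEMMAS AND PROOFS =====

-- helper definitions for the proofs
-- hashes of l not in ks, in order of first appearance (A's first loop keeps exactly these, in this order)
def pvFresh : List (String × Option String) → List String → List String
  | [], _ => []
  | (_, none) :: t, ks => pvFresh t ks
  | (_, some h) :: t, ks => if h ∈ ks then pvFresh t ks else h :: pvFresh t (h :: ks)

-- (hash, id) pairs numbered from c
def pvEnum : List String → Int → List (String × Int)
  | [], _ => []
  | h :: t, c => (h, c) :: pvEnum t (c + 1)

-- the codes carrying hash x, in list order
def pvCodes (x : String) : List (String × Option String) → List String
  | [] => []
  | p :: t => if p.2 = some x then p.1 :: pvCodes x t else pvCodes x t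

-- running minimum, as B's min_code loop maintains it
def pvMinFold (cs : List String) (o : Option String) : Option String :=
  cs.foldl (fun o c => some (match o with | none => c | some v => min v c)) o

lemma pvMinFold_cons (c : String) (t : List String) (o : Option String) :
    pvMinFold (c :: t) o = pvMinFold t (some (match o with | none => c | some v => min v c)) := rfl

lemma pvCodes_mem (x : String) (l : List (String × Option String)) (a : String) :
    a ∈ pvCodes x l ↔ (a, some x) ∈ l := by
  induction l with
  | nil => simp [pvCodes]
  | cons p t ih =>
    obtain ⟨c, ph⟩ := p
    by_cases h : ph = some x
    · subst h; simp [pvCodes, ih, Prod.ext_iff]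
    · rw [pvCodes, if_neg h, ih, List.mem_cons]
      constructor
      · exact Or.inr
      · rintro (he | ht)
        · cases he; exact absurd rfl h
        · exact ht

lemma pvFresh_mem (l : List (String × Option String)) (ks : List String) (x : String) :
    x ∈ pvFresh l ks ↔ x ∉ ks ∧ ∃ c, (c, some x) ∈ l := by
  induction l generalizing ks with
  | nil => simp [pvFresh]
  | cons p t ih =>
    obtain ⟨c, ph⟩ := p
    cases ph with
    | none =>
      simp only [pvFresh, ih, List.mem_cons]
      constructor
      · rintro ⟨hx, c', hc⟩; exact ⟨hx, c', Or.inr hc⟩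
      · rintro ⟨hx, c', he | ht⟩
        · cases he
        · exact ⟨hx, c', ht⟩
    | some h =>
      by_cases hk : h ∈ ks
      · simp only [pvFresh, if_pos hk, ih]
        constructor
        · rintro ⟨hx, c', hc⟩; exact ⟨hx, c', List.mem_cons_of_mem _ hc⟩
        · rintro ⟨hx, c', hc⟩
          rcases List.mem_cons.mp hc with he | ht
          · simp only [Prod.mk.injEq, Option.some.injEq] at he
            obtain ⟨rfl, rfl⟩ := he
            exact absurd hk hx
          · exact ⟨hx, c', ht⟩
      · simp only [pvFresh, if_neg hk]
        by_cases hxh : x = h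
        · subst hxh
          simp only [List.mem_cons_self, true_iff]
          exact ⟨hk, c, List.mem_cons_self ..⟩
        · constructor
          · intro hm
            rcases List.mem_cons.mp hm with he | hm'
            · exact absurd he hxh
            · obtain ⟨hx, c', hc⟩ := (ih (h :: ks)).mp hm'
              exact ⟨fun hxk => hx (List.mem_cons_of_mem _ hxk), c', List.mem_cons_of_mem _ hc⟩
          · rintro ⟨hx, c', hc⟩
            rcases List.mem_cons.mp hc with he | ht
            · simp only [Prod.mk.injEq, Option.some.injEq] at he
              exact absurd he.2 hxh
            · refine List.mem_cons_of_mem _ ((ih (h :: ks)).mpr ?_)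
              exact ⟨fun hm => (List.mem_cons.mp hm).elim hxh hx, c', ht⟩

lemma pvFresh_nodup (l : List (String × Option String)) (ks : List String) :
    (pvFresh l ks).Nodup := by
  induction l generalizing ks with
  | nil => simp [pvFresh]
  | cons p t ih =>
    obtain ⟨c, ph⟩ := p
    cases ph with
    | none => simpa [pvFresh] using ih ks
    | some h =>
      by_cases hk : h ∈ ks
      · simpa [pvFresh, hk] using ih ks
      · simp only [pvFresh, if_neg hk, List.nodup_cons]
        refine ⟨fun hm => ?_, ih (h :: ks)⟩
        exact ((pvFresh_mem t (h :: ks) h).mp hm).1 (List.mem_cons_self ..)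

lemma pvMinFold_some (cs : List String) (w : String) : ∃ v, pvMinFold cs (some w) = some v := by
  induction cs generalizing w with
  | nil => exact ⟨w, rfl⟩
  | cons c t ih => rw [pvMinFold_cons]; exact ih (min w c)

lemma pvMinFold_spec (cs : List String) (o : Option String) (v : String)
    (h : pvMinFold cs o = some v) :
    (o = some v ∨ v ∈ cs) ∧ (∀ w, o = some w → v ≤ w) ∧ ∀ c ∈ cs, v ≤ c := by
  induction cs generalizing o with
  | nil =>
    have hv : o = some v := h
    refine ⟨Or.inl hv, fun w hw => ?_, by simp⟩
    rw [hv] at hw; exact le_of_eq (Option.some_inj.mp hw)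
  | cons c t ih =>
    cases o with
    | none =>
      have h' : pvMinFold t (some c) = some v := h
      obtain ⟨hm, hw, hc⟩ := ih _ h'
      have hvc : v ≤ c := hw c rfl
      refine ⟨Or.inr ?_, fun w hw' => (Option.some_ne_none w hw'.symm).elim, fun c' hc' => ?_⟩
      · rcases hm with he | hmem
        · exact (Option.some_inj.mp he) ▸ List.mem_cons_self ..
        · exact List.mem_cons_of_mem _ hmem
      · rcases List.mem_cons.mp hc' with rfl | ht
        · exact hvc
        · exact hc _ ht
    | some w0 =>
      have h' : pvMinFold t (some (min w0 c)) = some v := h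
      obtain ⟨hm, hw, hc⟩ := ih _ h'
      have hvm : v ≤ min w0 c := hw _ rfl
      refine ⟨?_, fun w hw' => ?_, fun c' hc' => ?_⟩
      · rcases hm with he | hmem
        · have hv : v = min w0 c := (Option.some_inj.mp he).symm
          rcases le_total w0 c with hle | hle
          · exact Or.inl (by rw [hv, min_eq_left hle])
          · refine Or.inr ?_
            have : v = c := by rw [hv, min_eq_right hle]
            exact this ▸ List.mem_cons_self ..
        · exact Or.inr (List.mem_cons_of_mem _ hmem)
      · cases Option.some_inj.mp hw'
        exact le_trans hvm (min_le_left _ _)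
      · rcases List.mem_cons.mp hc' with rfl | ht
        · exact le_trans hvm (min_le_right _ _)
        · exact hc _ ht

lemma pv_mc_keys_mem (l : List (String × Option String)) (acc : PySem.Dict String String) (x : String) :
    x ∈ (l.foldl
      (fun (acc : PySem.Dict String String) p =>
        match p.2 with
        | none => acc
        | some ph => if !acc.contains ph || decide (p.1 < acc.getD ph "") then acc.insert ph p.1 else acc)
      acc).keys ↔ x ∈ acc.keys ∨ ∃ c, (c, some x) ∈ l := by
  induction l generalizing acc with
  | nil => simp
  | cons p t ih =>
    obtain ⟨c, ph⟩ := p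
    cases ph with
    | none =>
      simp only [List.foldl_cons]
      rw [ih]
      simp only [List.mem_cons, Prod.mk.injEq]
      constructor
      · rintro (hk | ⟨c', hc⟩); · exact Or.inl hk
        exact Or.inr ⟨c', Or.inr hc⟩
      · rintro (hk | ⟨c', ⟨_, he⟩ | hc⟩)
        · exact Or.inl hk
        · cases he
        · exact Or.inr ⟨c', hc⟩
    | some h =>
      simp only [List.foldl_cons]
      split
      · next hcond =>
        rw [ih]
        simp only [PySem.Dict.mem_keys_insert, List.mem_cons, Prod.mk.injEq, Option.some.injEq]
        constructor
        · rintro ((rfl | hk) | ⟨c', hc⟩)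
          · exact Or.inr ⟨c, Or.inl ⟨rfl, rfl⟩⟩
          · exact Or.inl hk
          · exact Or.inr ⟨c', Or.inr hc⟩
        · rintro (hk | ⟨c', ⟨rfl, rfl⟩ | hc⟩)
          · exact Or.inl (Or.inr hk)
          · exact Or.inl (Or.inl rfl)
          · exact Or.inr ⟨c', hc⟩
      · next hcond =>
        rw [ih]
        have hcontains : acc.contains h = true := by
          by_contra hcf
          simp only [Bool.not_eq_true] at hcf
          simp [hcf] at hcond
        have hmem : h ∈ acc.keys := (PySem.Dict.contains_iff_mem_keys _ _).mp hcontains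
        simp only [List.mem_cons, Prod.mk.injEq, Option.some.injEq]
        constructor
        · rintro (hk | ⟨c', hc⟩)
          · exact Or.inl hk
          · exact Or.inr ⟨c', Or.inr hc⟩
        · rintro (hk | ⟨c', ⟨rfl, rfl⟩ | hc⟩)
          · exact Or.inl hk
          · exact Or.inl hmem
          · exact Or.inr ⟨c', hc⟩

lemma pv_mc_keys_nodup (l : List (String × Option String)) (acc : PySem.Dict String String)
    (h : acc.keys.Nodup) :
    (l.foldl
      (fun (acc : PySem.Dict String String) p =>
        match p.2 with
        | none => acc
        | some ph => if !acc.contains ph || decide (p.1 < acc.getD ph "") then acc.insert ph p.1 else acc)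
      acc).keys.Nodup := by
  induction l generalizing acc with
  | nil => exact h
  | cons p t ih =>
    obtain ⟨c, ph⟩ := p
    cases ph with
    | none => exact ih acc h
    | some hh =>
      simp only [List.foldl_cons]
      split
      · exact ih _ (PySem.Dict.nodup_keys_insert _ _ _ h)
      · exact ih _ h

lemma pv_mc_get (l : List (String × Option String)) (acc : PySem.Dict String String) (x : String) :
    (l.foldl
      (fun (acc : PySem.Dict String String) p =>
        match p.2 with
        | none => acc
        | some ph => if !acc.contains ph || decide (p.1 < acc.getD ph "") then acc.insert ph p.1 else acc)
      acc).get? x = pvMinFold (pvCodes x l) (acc.get? x) := by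
  induction l generalizing acc with
  | nil => rfl
  | cons p t ih =>
    obtain ⟨c, ph⟩ := p
    cases ph with
    | none => simpa only [List.foldl_cons, pvCodes, reduceCtorEq, if_neg] using ih acc
    | some h =>
      simp only [List.foldl_cons]
      by_cases hhx : h = x
      · subst hhx
        rw [show pvCodes h ((c, some h) :: t) = c :: pvCodes h t by simp [pvCodes]]
        cases hacc : acc.get? h with
        | none =>
          have hcont : acc.contains h = false := by
            rw [PySem.Dict.contains_eq_isSome_get?, hacc]; rfl
          rw [if_pos (by simp [hcont])]
          rw [ih, PySem.Dict.get?_insert_self]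
          rfl
        | some v =>
          have hcont : acc.contains h = true := by
            rw [PySem.Dict.contains_eq_isSome_get?, hacc]; rfl
          have hgetD : acc.getD h "" = v := by
            rw [PySem.Dict.getD_eq_get?_getD, hacc]; rfl
          rw [hcont, hgetD]
          by_cases hlt : c < v
          · rw [if_pos (by simp [hlt])]
            rw [ih, PySem.Dict.get?_insert_self]
            have : pvMinFold (c :: pvCodes h t) (some v) = pvMinFold (pvCodes h t) (some (min v c)) := rfl
            rw [this, min_eq_right (le_of_lt hlt)]
          · rw [if_neg (by simp [hlt])]
            rw [ih, hacc]
            have : pvMinFold (c :: pvCodes h t) (some v) = pvMinFold (pvCodes h t) (some (min v c)) := rfl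
            rw [this, min_eq_left (not_lt.mp hlt)]
      · rw [show pvCodes x ((c, some h) :: t) = pvCodes x t by
          simp [pvCodes, fun he : h = x => hhx he]]
        split
        · rw [ih, PySem.Dict.get?_insert_of_ne _ _ (fun he => hhx he.symm)]
        · rw [ih]

lemma pv_A_items (l : List (String × Option String)) (d : PySem.Dict String Int) (c : Int)
    (ks : List String) (hk : ∀ x, d.contains x = true ↔ x ∈ ks) :
    (l.foldl
      (fun (acc : PySem.Dict String Int × Int) p =>
        match p.2 with
        | none => acc
        | some ph => if acc.1.contains ph then acc else (acc.1.insert ph acc.2, acc.2 + 1))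
      (d, c)).1.items = d.items ++ pvEnum (pvFresh l ks) c := by
  induction l generalizing d c ks with
  | nil => simp [pvFresh, pvEnum]
  | cons p t ih =>
    obtain ⟨cc, ph⟩ := p
    cases ph with
    | none => simpa only [List.foldl_cons, pvFresh] using ih d c ks hk
    | some h =>
      simp only [List.foldl_cons]
      by_cases hks : h ∈ ks
      · rw [if_pos ((hk h).mpr hks)]
        rw [show pvFresh ((cc, some h) :: t) ks = pvFresh t ks from by simp [pvFresh, hks]]
        exact ih d c ks hk
      · have hcf : d.contains h = false := by
          by_contra hc
          simp only [Bool.not_eq_false] at hc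
          exact hks ((hk h).mp hc)
        rw [if_neg (by simp [hcf])]
        rw [show pvFresh ((cc, some h) :: t) ks = h :: pvFresh t (h :: ks) from by
          simp [pvFresh, hks]]
        have hk' : ∀ x, (d.insert h c).contains x = true ↔ x ∈ h :: ks := by
          intro x
          rw [PySem.Dict.contains_insert, List.mem_cons]
          simp only [Bool.or_eq_true, beq_iff_eq]
          exact or_congr Iff.rfl (hk x)
        rw [ih (d.insert h c) (c + 1) (h :: ks) hk']
        rw [PySem.Dict.items_insert_of_not_contains d c hcf]
        simp [pvEnum]

-- lookup in the numbering list: the id of x is its position plus the starting id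
lemma pvEnum_getD (hs : List String) (c : Int) (x : String) (hx : x ∈ hs) :
    (PySem.Dict.mk (pvEnum hs c)).getD x 0 = c + ((PySem.List.index? hs x).getD 0 : Int) := by
  induction hs generalizing c with
  | nil => cases hx
  | cons h t ih =>
    rw [show pvEnum (h :: t) c = (h, c) :: pvEnum t (c + 1) from rfl]
    by_cases hhx : h = x
    · subst hhx
      rw [PySem.List.index?_cons_self]
      rw [PySem.Dict.getD_eq_get?_getD, PySem.Dict.get?_mk_cons]
      simp
    · have hxt : x ∈ t := by
        rcases List.mem_cons.mp hx with rfl | ht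
        · exact absurd rfl hhx
        · exact ht
      obtain ⟨k, hk⟩ := Option.isSome_iff_exists.mp ((PySem.List.index?_isSome_iff t x).mpr hxt)
      rw [PySem.List.index?_cons_of_ne _ hhx, hk]
      have hne : (h == x) = false := beq_eq_false_iff_ne.mpr hhx
      rw [PySem.Dict.getD_eq_get?_getD, PySem.Dict.get?_mk_cons, hne]
      have := ih (c + 1) hxt
      rw [PySem.Dict.getD_eq_get?_getD, hk] at this
      simp only [if_false, Bool.false_eq_true]
      rw [this]
      simp only [Option.map_some, Option.getD_some]
      push_cast
      ring

lemma pvFresh_spec (MC : PySem.Dict String String) :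
    ∀ (l : List (String × Option String)) (ks : List String),
    l.Pairwise (fun p q => p.1 < q.1) →
    (∀ x c, x ∉ ks → (c, some x) ∈ l →
      ∃ v, MC.get? x = some v ∧ v ∈ pvCodes x l ∧ ∀ c' ∈ pvCodes x l, v ≤ c') →
    (pvFresh l ks).Pairwise (fun a b => MC.getD a "" < MC.getD b "") ∧
    (∀ b ∈ pvFresh l ks, ∃ cb, MC.get? b = some cb ∧ (cb, some b) ∈ l) := by
  intro l
  induction l with
  | nil => intro ks _ _; simp [pvFresh]
  | cons p t ih =>
    intro ks hpw H
    obtain ⟨c, ph⟩ := p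
    have hpw' : t.Pairwise (fun p q => p.1 < q.1) := (List.pairwise_cons.mp hpw).2
    have hhd : ∀ q ∈ t, c < q.1 := (List.pairwise_cons.mp hpw).1
    cases ph with
    | none =>
      have hcodes : ∀ x, pvCodes x ((c, none) :: t) = pvCodes x t := by
        intro x; simp [pvCodes]
      have H' : ∀ x cx, x ∉ ks → (cx, some x) ∈ t →
          ∃ v, MC.get? x = some v ∧ v ∈ pvCodes x t ∧ ∀ c' ∈ pvCodes x t, v ≤ c' := by
        intro x cx hx hm
        obtain ⟨v, hv, hvm, hvl⟩ := H x cx hx (List.mem_cons_of_mem _ hm)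
        rw [hcodes] at hvm hvl
        exact ⟨v, hv, hvm, hvl⟩
      obtain ⟨h1, h2⟩ := ih ks hpw' H'
      refine ⟨by simpa [pvFresh] using h1, fun b hb => ?_⟩
      obtain ⟨cb, hcb, hcm⟩ := h2 b (by simpa [pvFresh] using hb)
      exact ⟨cb, hcb, List.mem_cons_of_mem _ hcm⟩
    | some h =>
      have hcodes_ne : ∀ x, x ≠ h → pvCodes x ((c, some h) :: t) = pvCodes x t := by
        intro x hx
        simp [pvCodes, Ne.symm hx]
      by_cases hks : h ∈ ks
      · rw [show pvFresh ((c, some h) :: t) ks = pvFresh t ks from by simp [pvFresh, hks]]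
        have H' : ∀ x cx, x ∉ ks → (cx, some x) ∈ t →
            ∃ v, MC.get? x = some v ∧ v ∈ pvCodes x t ∧ ∀ c' ∈ pvCodes x t, v ≤ c' := by
          intro x cx hx hm
          have hxh : x ≠ h := fun he => hx (he ▸ hks)
          obtain ⟨v, hv, hvm, hvl⟩ := H x cx hx (List.mem_cons_of_mem _ hm)
          rw [hcodes_ne x hxh] at hvm hvl
          exact ⟨v, hv, hvm, hvl⟩
        obtain ⟨h1, h2⟩ := ih ks hpw' H'
        refine ⟨h1, fun b hb => ?_⟩
        obtain ⟨cb, hcb, hcm⟩ := h2 b hb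
        exact ⟨cb, hcb, List.mem_cons_of_mem _ hcm⟩
      · rw [show pvFresh ((c, some h) :: t) ks = h :: pvFresh t (h :: ks) from by
          simp [pvFresh, hks]]
        -- the head's minimum code is exactly c
        have hch : pvCodes h ((c, some h) :: t) = c :: pvCodes h t := by simp [pvCodes]
        obtain ⟨v, hv, hvm, hvl⟩ := H h c hks (List.mem_cons_self ..)
        have hvc : v ≤ c := hvl c (by rw [hch]; exact List.mem_cons_self ..)
        have hveq : v = c := by
          rw [hch] at hvm
          rcases List.mem_cons.mp hvm with rfl | hvt
          · rfl
          · have : (v, some h) ∈ t := (pvCodes_mem h t v).mp hvt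
            exact absurd (hhd _ this) (not_lt.mpr hvc)
        have H' : ∀ x cx, x ∉ h :: ks → (cx, some x) ∈ t →
            ∃ w, MC.get? x = some w ∧ w ∈ pvCodes x t ∧ ∀ c' ∈ pvCodes x t, w ≤ c' := by
          intro x cx hx hm
          have hxh : x ≠ h := fun he => hx (he ▸ List.mem_cons_self ..)
          obtain ⟨w, hw, hwm, hwl⟩ := H x cx (fun hxk => hx (List.mem_cons_of_mem _ hxk))
            (List.mem_cons_of_mem _ hm)
          rw [hcodes_ne x hxh] at hwm hwl
          exact ⟨w, hw, hwm, hwl⟩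
        obtain ⟨h1, h2⟩ := ih (h :: ks) hpw' H'
        have hgetDh : MC.getD h "" = c := by
          rw [PySem.Dict.getD_eq_get?_getD, hv, hveq]; rfl
        constructor
        · rw [List.pairwise_cons]
          refine ⟨fun b hb => ?_, h1⟩
          obtain ⟨cb, hcb, hcm⟩ := h2 b hb
          have hgetDb : MC.getD b "" = cb := by
            rw [PySem.Dict.getD_eq_get?_getD, hcb]; rfl
          rw [hgetDh, hgetDb]
          exact hhd _ hcm
        · intro b hb
          rcases List.mem_cons.mp hb with rfl | hbt
          · exact ⟨c, hveq ▸ hv, List.mem_cons_self ..⟩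
          · obtain ⟨cb, hcb, hcm⟩ := h2 b hbt
            exact ⟨cb, hcb, List.mem_cons_of_mem _ hcm⟩

-- the core agreement: for every hash actually carried by some code, A's id-dict lookup
-- equals 1 + the position of the hash in B's ranked list
lemma pv_core (m : List (String × Option String)) (ph c : String)
    (hmem : (c, some ph) ∈ (PySem.Dict.ofList m).items) :
    ((PySem.List.sorted (PySem.Dict.ofList m).items (fun p => p.1) false).foldl
      (fun (acc : PySem.Dict String Int × Int) p =>
        match p.2 with
        | none => acc
        | some ph => if acc.1.contains ph then acc else (acc.1.insert ph acc.2, acc.2 + 1))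
      (PySem.Dict.empty, 1)).1.getD ph 0
    = ((PySem.List.index?
        (PySem.List.sorted ((PySem.Dict.ofList m).items.foldl
          (fun (acc : PySem.Dict String String) p =>
            match p.2 with
            | none => acc
            | some ph => if !acc.contains ph || decide (p.1 < acc.getD ph "") then acc.insert ph p.1 else acc)
          PySem.Dict.empty).keys
        (fun h => ((PySem.Dict.ofList m).items.foldl
          (fun (acc : PySem.Dict String String) p =>
            match p.2 with
            | none => acc
            | some ph => if !acc.contains ph || decide (p.1 < acc.getD ph "") then acc.insert ph p.1 else acc)
          PySem.Dict.empty).getD h "") false) ph).getD 0 : Int) + 1 := by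
  set items := (PySem.Dict.ofList m).items with hitems
  set MC := items.foldl
      (fun (acc : PySem.Dict String String) p =>
        match p.2 with
        | none => acc
        | some ph => if !acc.contains ph || decide (p.1 < acc.getD ph "") then acc.insert ph p.1 else acc)
      PySem.Dict.empty with hMC
  set s := PySem.List.sorted items (fun p => p.1) false with hs
  have hnod : ((PySem.Dict.ofList m).items.map Prod.fst).Nodup := by
    have := PySem.Dict.nodup_keys_ofList (κ := String) (ν := Option String) m
    simpa [PySem.Dict.keys] using this
  have hperm_s : s.Perm items := PySem.List.sorted_perm items (fun p => p.1) false
  have hmapnodup : (s.map Prod.fst).Nodup := by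
    refine (List.Perm.nodup_iff (hperm_s.map Prod.fst)).mpr ?_
    simpa [hitems] using hnod
  have hpw_lt : s.Pairwise (fun p q => p.1 < q.1) := by
    have hle : s.Pairwise (fun p q => p.1 ≤ q.1) :=
      PySem.List.sorted_pairwise items (fun p => p.1)
    have hne : s.Pairwise (fun p q => p.1 ≠ q.1) := List.pairwise_map.mp hmapnodup
    exact (hle.and hne).imp (fun hab => lt_of_le_of_ne hab.1 hab.2)
  have hMCget : ∀ x, MC.get? x = pvMinFold (pvCodes x items) none := by
    intro x
    rw [hMC, pv_mc_get]
    simp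
  have H : ∀ x c, x ∉ ([] : List String) → (c, some x) ∈ s →
      ∃ v, MC.get? x = some v ∧ v ∈ pvCodes x s ∧ ∀ c' ∈ pvCodes x s, v ≤ c' := by
    intro x c _ hm
    have hcm : c ∈ pvCodes x items := (pvCodes_mem x items c).mpr (hperm_s.subset hm)
    obtain ⟨v, hv⟩ : ∃ v, pvMinFold (pvCodes x items) none = some v := by
      cases hcs : pvCodes x items with
      | nil => rw [hcs] at hcm; cases hcm
      | cons a rest =>
        have : pvMinFold (a :: rest) none = pvMinFold rest (some a) := rfl
        rw [this]; exact pvMinFold_some rest a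
    obtain ⟨hm1, _, hm3⟩ := pvMinFold_spec _ _ _ hv
    have hvmem : v ∈ pvCodes x items := by
      rcases hm1 with he | hmem
      · exact absurd he (by simp)
      · exact hmem
    refine ⟨v, (hMCget x).trans hv, ?_, ?_⟩
    · exact (pvCodes_mem x s v).mpr (hperm_s.mem_iff.mpr ((pvCodes_mem x items v).mp hvmem))
    · intro c' hc'
      exact hm3 c' ((pvCodes_mem x items c').mpr (hperm_s.subset ((pvCodes_mem x s c').mp hc')))
  obtain ⟨hPW, _⟩ := pvFresh_spec MC s [] hpw_lt H
  have hMCnodup : MC.keys.Nodup := by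
    rw [hMC]; exact pv_mc_keys_nodup items PySem.Dict.empty (by simp)
  have hperm : (pvFresh s []).Perm MC.keys := by
    refine (List.perm_ext_iff_of_nodup (pvFresh_nodup s []) hMCnodup).mpr (fun x => ?_)
    rw [pvFresh_mem, hMC, pv_mc_keys_mem]
    simp only [List.not_mem_nil, not_false_iff, true_and]
    constructor
    · rintro ⟨c, hc⟩; exact Or.inr ⟨c, hperm_s.subset hc⟩
    · rintro (hk | ⟨c, hc⟩)
      · simp at hk
      · exact ⟨c, hperm_s.mem_iff.mpr hc⟩
  have hsorted_eq : PySem.List.sorted MC.keys (fun h => MC.getD h "") false = pvFresh s [] :=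
    PySem.List.sorted_eq_of_perm_of_pairwise_lt MC.keys (pvFresh s []) _ hperm hPW
  have hA : ((s.foldl
      (fun (acc : PySem.Dict String Int × Int) p =>
        match p.2 with
        | none => acc
        | some ph => if acc.1.contains ph then acc else (acc.1.insert ph acc.2, acc.2 + 1))
      (PySem.Dict.empty, 1)).1).items = pvEnum (pvFresh s []) 1 := by
    rw [pv_A_items s PySem.Dict.empty 1 [] (by simp)]
    simp [show (PySem.Dict.empty : PySem.Dict String Int).items = [] from rfl]
  have hDict : (s.foldl
      (fun (acc : PySem.Dict String Int × Int) p =>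
        match p.2 with
        | none => acc
        | some ph => if acc.1.contains ph then acc else (acc.1.insert ph acc.2, acc.2 + 1))
      (PySem.Dict.empty, 1)).1 = PySem.Dict.mk (pvEnum (pvFresh s []) 1) :=
    PySem.Dict.ext hA
  have hph : ph ∈ pvFresh s [] :=
    (pvFresh_mem s [] ph).mpr ⟨by simp, c, hperm_s.mem_iff.mpr hmem⟩
  rw [hDict, hsorted_eq, pvEnum_getD _ _ _ hph]
  omega

-- A's second loop inserts each unique code once, so its output items are a map over the items
lemma pv_out_items (l : List (String × Option String)) (D : PySem.Dict String Int)
    (hl : (l.map Prod.fst).Nodup) :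
    (l.foldl
      (fun (out : PySem.Dict String (Option Int)) p =>
        match p.2 with
        | none => out.insert p.1 none
        | some ph => out.insert p.1 (some (D.getD ph 0)))
      PySem.Dict.empty).items
    = l.map (fun p => (p.1, p.2.map (fun ph => D.getD ph 0))) := by
  have hf : (fun (out : PySem.Dict String (Option Int)) (p : String × Option String) =>
      match p.2 with
      | none => out.insert p.1 none
      | some ph => out.insert p.1 (some (D.getD ph 0)))
      = fun out p => out.insert p.1 (p.2.map (fun ph => D.getD ph 0)) := by
    funext out p
    cases p.2 <;> rfl
  rw [hf, PySem.Dict.items_foldl_insert_fresh l Prod.fst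
    (fun p => p.2.map (fun ph => D.getD ph 0)) PySem.Dict.empty (by simp) hl]
  simp [show (PySem.Dict.empty : PySem.Dict String (Option Int)).items = [] from rfl]

-- ===== VERDICT (by name: the statement is the Claim_ definition above) =====
theorem assign_cluster_ids_spec : Claim_equal_assign_cluster_ids := by
  intro m _
  unfold Spec_assign_cluster_ids assign_cluster_ids assign_cluster_ids_alt
  have hnod : ((PySem.Dict.ofList m).items.map Prod.fst).Nodup := by
    have := PySem.Dict.nodup_keys_ofList (κ := String) (ν := Option String) m
    simpa [PySem.Dict.keys] using this
  rw [pv_out_items _ _ hnod]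
  refine List.map_congr_left (fun p hp => ?_)
  obtain ⟨c, ph⟩ := p
  cases ph with
  | none => rfl
  | some h =>
    simp only [Option.map_some, Prod.mk.injEq, Option.some.injEq, true_and]
    exact pv_core m h c hp
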